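-- pv_equiv track=rewrite | github.com/jkranker18/wellchemyai | backend/agents/prescription_agent.py | select_meals
-- ===== SOURCE A (Python) =====
-- def select_meals(meal_ids, quantity):
--     selected = []
--     idx = 0
--     while len(selected) < quantity:
--         meal = meal_ids[idx % len(meal_ids)]
--         selected.append(meal)
--         idx += 1
--     return selected
-- ===== SOURCE B (Python) =====
-- def select_meals(meal_ids, quantity):
--     if quantity <= 0:
--         return []
--     n = -(-quantity // len(meal_ids))  # ceil division; raises ZeroDivisionError on empty meal_ids, like A
--     return (meal_ids * n)[:quantity]
-- ===== Notes on version B (the rewrite author's own statement) =====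
-- stated objective: simpler
-- what changed: Replaces the element-by-element while-loop with modular indexing by a closed-form construction: ceil-divide to get the repetition count, replicate the whole list, and slice to length.
import Mathlib
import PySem

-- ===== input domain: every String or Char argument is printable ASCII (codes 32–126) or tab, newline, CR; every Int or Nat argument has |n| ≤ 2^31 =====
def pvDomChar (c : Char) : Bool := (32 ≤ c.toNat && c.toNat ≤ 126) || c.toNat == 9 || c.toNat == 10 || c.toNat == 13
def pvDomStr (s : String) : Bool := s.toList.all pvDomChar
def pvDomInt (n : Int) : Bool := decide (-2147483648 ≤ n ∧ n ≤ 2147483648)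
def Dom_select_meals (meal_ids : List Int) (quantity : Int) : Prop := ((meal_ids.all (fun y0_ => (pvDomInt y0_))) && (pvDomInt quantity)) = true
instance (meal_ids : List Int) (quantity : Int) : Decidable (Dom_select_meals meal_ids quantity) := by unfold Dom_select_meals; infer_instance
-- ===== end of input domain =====

-- B replaces A's element-by-element while-loop (modular indexing) by a closed-form
-- replicate-and-slice construction; objective: simpler.


-- ===== PORT A =====
-- the while-loop: state (selected, idx); one step appends meal_ids[idx % len] and bumps idx.
-- 'idx % len' with len = 0 (Python ZeroDivisionError) is excluded by Pre_; the port stops there.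
def selectLoopA (meal_ids : List Int) (quantity : Int) (selected : List Int) (idx : Nat) : List Int :=
  if h : (selected.length : Int) < quantity then
    match PySem.List.pyGet? meal_ids ((idx % meal_ids.length : Nat) : Int) with
    | some meal => selectLoopA meal_ids quantity (selected ++ [meal]) (idx + 1)
    | none => selected   -- unreachable under Pre_ (Python would raise)
  else selected
termination_by (quantity - selected.length).toNat
decreasing_by simp_all; omega

def select_meals (meal_ids : List Int) (quantity : Int) : List Int :=
  selectLoopA meal_ids quantity [] 0

-- ===== PORT B =====
def select_meals_alt (meal_ids : List Int) (quantity : Int) : List Int :=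
  if quantity ≤ 0 then []
  else
    let n : Int := -(PySem.Int.floordiv (-quantity) meal_ids.length)   -- ceil division
    PySem.List.slice ((List.replicate n.toNat meal_ids).flatten) none (some quantity)   -- (meal_ids * n)[:quantity]

-- ===== PRECONDITION & SPEC =====
-- Pre_ excludes exactly the inputs where Python A raises ZeroDivisionError:
-- empty meal_ids with positive quantity.
def Pre_select_meals (meal_ids : List Int) (quantity : Int) : Prop :=
  meal_ids ≠ [] ∨ quantity ≤ 0
instance (meal_ids : List Int) (quantity : Int) : Decidable (Pre_select_meals meal_ids quantity) := by unfold Pre_select_meals; infer_instance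

def pvWitness_select_meals : List Int × Int := ([3, 7], 5)

def Spec_select_meals (meal_ids : List Int) (quantity : Int) (out : List Int) : Prop := out = select_meals_alt meal_ids quantity
instance (meal_ids : List Int) (quantity : Int) (out : List Int) : Decidable (Spec_select_meals meal_ids quantity out) := by unfold Spec_select_meals; infer_instance

-- ===== CLAIM (what is proved, stated in full; the proofs are below) =====
def Claim_equal_select_meals : Prop := ∀ (meal_ids : List Int) (quantity : Int), Dom_select_meals meal_ids quantity → Pre_select_meals meal_ids quantity → Spec_select_meals meal_ids quantity (select_meals meal_ids quantity)

-- ===== LEMMAS AND PROOFS =====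

-- A's loop appends the cyclic elements starting at idx.
theorem selectLoopA_eq (m : List Int) (hm : m ≠ []) (q : Int) :
    ∀ (k : Nat) (sel : List Int) (idx : Nat), (q - sel.length).toNat = k →
      selectLoopA m q sel idx =
        sel ++ (List.range k).map (fun i => m[(idx + i) % m.length]!) := by
  intro k
  induction k with
  | zero =>
    intro sel idx hk
    rw [selectLoopA]
    have : ¬ ((sel.length : Int) < q) := by omega
    simp [this]
  | succ k ih =>
    intro sel idx hk
    have hlt : (sel.length : Int) < q := by omega
    have hpos : 0 < m.length := List.length_pos_iff.mpr hm
    have hidx : idx % m.length < m.length := Nat.mod_lt _ hpos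
    rw [selectLoopA]
    simp only [hlt, dif_pos]
    rw [PySem.List.pyGet?_natCast]
    have hget : m[(idx % m.length : Nat)]? = some (m[idx % m.length]!) := by
      rw [List.getElem?_eq_getElem hidx, List.getElem!_eq_getElem?_getD,
        List.getElem?_eq_getElem hidx]
      rfl
    rw [hget]
    have hred : (match some (m[idx % m.length]!) with
        | some meal => selectLoopA m q (sel ++ [meal]) (idx + 1)
        | none => sel) = selectLoopA m q (sel ++ [m[idx % m.length]!]) (idx + 1) := rfl
    rw [hred]
    rw [ih (sel ++ [m[idx % m.length]!]) (idx + 1) (by simp; omega)]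
    rw [List.range_succ_eq_map, List.map_cons, List.map_map]
    rw [List.append_assoc, List.singleton_append, Nat.add_zero]
    congr 1
    congr 1
    apply List.map_congr_left
    intro i _
    simp only [Function.comp_apply, Nat.succ_eq_add_one]
    have h3 : idx + 1 + i = idx + (i + 1) := by omega
    rw [h3]

-- flatten of a replicate, read at modular index
theorem flatten_replicate_getElem (m : List Int) (hm : m ≠ []) :
    ∀ (n i : Nat), i < n * m.length →
      ((List.replicate n m).flatten)[i]! = m[i % m.length]! := by
  intro n
  induction n with
  | zero => intro i h; omega
  | succ n ih =>
    intro i h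
    have hpos : 0 < m.length := List.length_pos_iff.mpr hm
    rw [List.replicate_succ, List.flatten_cons]
    by_cases hi : i < m.length
    · have hlen : i < (m ++ (List.replicate n m).flatten).length := by
        simp [List.length_flatten]; omega
      rw [List.getElem!_eq_getElem?_getD, List.getElem?_eq_getElem hlen]
      rw [List.getElem_append_left hi]
      rw [Nat.mod_eq_of_lt hi]
      rw [List.getElem!_eq_getElem?_getD, List.getElem?_eq_getElem hi]
    · push_neg at hi
      have h2 : i - m.length < n * m.length := by
        have hs : (n + 1) * m.length = n * m.length + m.length := by ring
        omega
      have hflen : i - m.length < ((List.replicate n m).flatten).length := by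
        simp [List.length_flatten] at *; omega
      have hlen : i < (m ++ (List.replicate n m).flatten).length := by
        simp [List.length_flatten]
        simp [List.length_flatten] at hflen; omega
      rw [List.getElem!_eq_getElem?_getD, List.getElem?_eq_getElem hlen]
      rw [List.getElem_append_right hi]
      have := ih (i - m.length) h2
      rw [List.getElem!_eq_getElem?_getD, List.getElem?_eq_getElem hflen] at this
      rw [this, Nat.mod_eq_sub_mod hi]

theorem length_flatten_replicate (m : List Int) (n : Nat) :
    ((List.replicate n m).flatten).length = n * m.length := by
  induction n with
  | zero => simp
  | succ n ih => rw [List.replicate_succ, List.flatten_cons]; simp [ih]; ring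

-- ===== VERDICT (by name: the statement is the Claim_ definition above) =====
theorem select_meals_spec : Claim_equal_select_meals := by
  intro m q _ hpre
  unfold Spec_select_meals select_meals select_meals_alt
  by_cases hq : q ≤ 0
  · rw [selectLoopA]
    have : ¬ ((([] : List Int).length : Int) < q) := by simp; omega
    simp [this, hq]
  · push_neg at hq
    have hm : m ≠ [] := by
      rcases hpre with h | h
      · exact h
      · omega
    have hpos : 0 < m.length := List.length_pos_iff.mpr hm
    have hLpos : (0 : Int) < (m.length : Int) := by exact_mod_cast hpos
    rw [if_neg (by omega : ¬ q ≤ 0)]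
    set n : Int := -(PySem.Int.floordiv (-q) (m.length : Int)) with hn
    have hfloor : PySem.Int.floordiv (-q) (m.length : Int) * (m.length : Int) ≤ -q :=
      (PySem.Int.le_floordiv_iff_mul_le hLpos).mp le_rfl
    have hnl : q ≤ n * (m.length : Int) := by rw [hn]; nlinarith [hfloor]
    have hnpos : 0 < n := by nlinarith
    have hcast : ((n.toNat * m.length : Nat) : Int) = n * (m.length : Int) := by
      push_cast [Int.toNat_of_nonneg (le_of_lt hnpos)]; ring
    have hcount : q.toNat ≤ n.toNat * m.length := by
      have h1 : ((q.toNat : Nat) : Int) ≤ ((n.toNat * m.length : Nat) : Int) := by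
        rw [hcast, Int.toNat_of_nonneg (le_of_lt hq)]; exact hnl
      exact_mod_cast h1
    rw [selectLoopA_eq m hm q q.toNat [] 0 (by simp)]
    rw [PySem.List.slice_to _ (le_of_lt hq), List.nil_append]
    apply List.ext_getElem
    · rw [List.length_map, List.length_range, List.length_take, length_flatten_replicate]
      omega
    · intro i h1 h2
      have hi : i < q.toNat := by simpa using h1
      have hflat : i < n.toNat * m.length := lt_of_lt_of_le hi hcount
      have hflen : i < ((List.replicate n.toNat m).flatten).length := by
        rw [length_flatten_replicate]; exact hflat
      rw [List.getElem_take, List.getElem_map, List.getElem_range]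
      have hg := flatten_replicate_getElem m hm n.toNat i hflat
      rw [List.getElem!_eq_getElem?_getD, List.getElem?_eq_getElem hflen] at hg
      simp only [Option.getD_some] at hg
      rw [hg]
      simp
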